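-- pv_equiv track=rewrite | github.com/andres-tenjo/BIA_app | apps/Modelos/Several_func.py | fncEliminaCerolst
-- ===== SOURCE A (Python) =====
-- def fncEliminaCerolst(lstLista):
--      if 0 in lstLista:
--           if lstLista.count(0)> 1:
--                return  fncEliminaCerolst(lstLista[lstLista.index(0)+ 1: ])
--           else:
--                return lstLista[lstLista.index(0)+ 1: ]
--      else:
--           return lstLista
-- ===== SOURCE B (Python) =====
-- def fncEliminaCerolst(lstLista):
--     acc = []
--     found = False
--     for x in lstLista:
--         if x == 0:
--             acc = []
--             found = True
--         else:
--             acc.append(x)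
--     return acc if found else lstLista
-- ===== Notes on version B (the rewrite author's own statement) =====
-- stated objective: simpler
-- what changed: Replaces A's repeated scan-and-strip recursion (each level rescans with 'in', count and index before slicing past the first zero) with one left-to-right pass that resets an accumulator at every zero and returns the original list when no zero was seen.
import Mathlib
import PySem

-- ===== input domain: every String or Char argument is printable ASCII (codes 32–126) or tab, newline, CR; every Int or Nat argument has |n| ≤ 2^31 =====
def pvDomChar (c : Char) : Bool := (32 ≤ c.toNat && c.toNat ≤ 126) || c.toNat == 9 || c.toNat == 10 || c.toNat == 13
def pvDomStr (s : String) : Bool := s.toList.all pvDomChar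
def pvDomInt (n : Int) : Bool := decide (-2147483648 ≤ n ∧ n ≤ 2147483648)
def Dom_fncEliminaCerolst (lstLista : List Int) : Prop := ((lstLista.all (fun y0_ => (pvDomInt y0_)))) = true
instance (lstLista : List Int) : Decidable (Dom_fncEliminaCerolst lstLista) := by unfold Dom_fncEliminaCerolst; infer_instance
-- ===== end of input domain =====

-- B replaces A's repeated scan-and-strip recursion with one forward pass resetting an accumulator at each zero (simpler).

-- ===== PORT A =====
-- A's `lstLista.index(0)` is guarded by `0 in lstLista`, so it never raises; under that
-- guard Python's .index equals List.idxOf (= (PySem.List.index? l 0).getD _, first index).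
def fncEliminaCerolst (lstLista : List Int) : List Int :=
  if h : (0 : Int) ∈ lstLista then
    if PySem.List.count lstLista 0 > 1 then
      fncEliminaCerolst (PySem.List.slice lstLista (some ((lstLista.idxOf 0 : Int) + 1)) none)
    else
      PySem.List.slice lstLista (some ((lstLista.idxOf 0 : Int) + 1)) none
  else
    lstLista
termination_by lstLista.length
decreasing_by
  have h1 : ((lstLista.idxOf 0 : Int) + 1) = ((lstLista.idxOf 0 + 1 : Nat) : Int) := by push_cast; ring
  rw [h1, PySem.List.slice_from_natCast]
  have : 0 < lstLista.length := List.length_pos_of_mem h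
  simp [List.length_drop]; omega

-- ===== PORT B =====
-- the loop body of Source B: reset on zero, else append; `found` is the Bool component
def pvStep (st : List Int × Bool) (x : Int) : List Int × Bool :=
  if x == 0 then ([], true) else (st.1 ++ [x], st.2)

def fncEliminaCerolst_alt (lstLista : List Int) : List Int :=
  let p := lstLista.foldl pvStep (([] : List Int), false)
  if p.2 then p.1 else lstLista

-- ===== PRECONDITION & SPEC =====
def Spec_fncEliminaCerolst (lstLista : List Int) (out : List Int) : Prop := out = fncEliminaCerolst_alt lstLista
instance (lstLista : List Int) (out : List Int) : Decidable (Spec_fncEliminaCerolst lstLista out) := by unfold Spec_fncEliminaCerolst; infer_instance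

-- ===== CLAIM (what is proved, stated in full; the proofs are below) =====
def Claim_equal_fncEliminaCerolst : Prop := ∀ (lstLista : List Int), Dom_fncEliminaCerolst lstLista → Spec_fncEliminaCerolst lstLista (fncEliminaCerolst lstLista)

-- ===== LEMMAS AND PROOFS =====

-- a zero-free block just appends itself to the accumulator and keeps the flag
theorem pvFold_no_zero (l : List Int) (acc : List Int) (b : Bool) (h : (0 : Int) ∉ l) :
    l.foldl pvStep (acc, b) = (acc ++ l, b) := by
  induction l generalizing acc with
  | nil => simp
  | cons x xs ih =>
      have hx : x ≠ 0 := fun hx => h (hx ▸ List.mem_cons_self)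
      have hxs : (0 : Int) ∉ xs := fun hm => h (List.mem_cons_of_mem _ hm)
      simp [pvStep, hx, ih _ hxs]

-- once a zero is hit the state is reset, so the fold result ignores the starting state
theorem pvFold_indep (l : List Int) (h : (0 : Int) ∈ l) (st st' : List Int × Bool) :
    l.foldl pvStep st = l.foldl pvStep st' := by
  induction l generalizing st st' with
  | nil => simp at h
  | cons x xs ih =>
      by_cases hx : x = 0
      · simp [pvStep, hx]
      · have hxs : (0 : Int) ∈ xs := by
          rcases List.mem_cons.mp h with h0 | h0
          · exact absurd h0.symm hx
          · exact h0
        simp only [List.foldl_cons]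
        exact ih hxs _ _

-- any list containing a zero ends the fold with the flag set
theorem pvFold_flag (l : List Int) (h : (0 : Int) ∈ l) (st : List Int × Bool) :
    (l.foldl pvStep st).2 = true := by
  induction l generalizing st with
  | nil => simp at h
  | cons x xs ih =>
      by_cases hx : x = 0
      · subst hx
        by_cases hxs : (0 : Int) ∈ xs
        · simp only [List.foldl_cons]; exact ih hxs _
        · simp [pvStep, pvFold_no_zero xs [] true hxs]
      · have hxs : (0 : Int) ∈ xs := by
          rcases List.mem_cons.mp h with h0 | h0
          · exact absurd h0.symm hx
          · exact h0
        simp only [List.foldl_cons]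
        exact ih hxs _

-- Python's .index as idxOf? (first index) is some (idxOf) on members
theorem pvIdxOf?_of_mem (l : List Int) (h : (0 : Int) ∈ l) : l.idxOf? 0 = some (l.idxOf 0) := by
  induction l with
  | nil => simp at h
  | cons x xs ih =>
      by_cases hx : x = 0
      · simp [List.idxOf?_cons, hx]
      · have hxs : (0 : Int) ∈ xs := by
          rcases List.mem_cons.mp h with h0 | h0
          exacts [absurd h0.symm hx, h0]
        simp [List.idxOf?_cons, hx, ih hxs]

-- A strips to the suffix after the first zero; that slice is `suf` of the decomposition
theorem pvSlice_eq_suf (pre suf : List Int) (hpre : (0 : Int) ∉ pre) :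
    PySem.List.slice (pre ++ 0 :: suf) (some (((pre ++ 0 :: suf).idxOf 0 : Int) + 1)) none = suf := by
  have hidx : (pre ++ 0 :: suf).idxOf 0 = pre.length := by
    have h1 : PySem.List.index? (pre ++ 0 :: suf) 0 = some pre.length :=
      (PySem.List.index?_eq_some_iff _ _ _).mpr ⟨pre, suf, rfl, rfl, hpre⟩
    have h2 := pvIdxOf?_of_mem (pre ++ 0 :: suf) (by simp)
    rw [PySem.List.index?_eq_idxOf?, h2] at h1
    exact Option.some_injective _ h1
  rw [hidx]
  have hcast : ((pre.length : Int) + 1) = ((pre.length + 1 : Nat) : Int) := by push_cast; ring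
  rw [hcast, PySem.List.slice_from_natCast]
  have hlen : (pre ++ [(0 : Int)]).length = pre.length + 1 := by simp
  calc (pre ++ 0 :: suf).drop (pre.length + 1)
      = ((pre ++ [(0 : Int)]) ++ suf).drop (pre ++ [(0 : Int)]).length := by
        rw [hlen]; simp
    _ = suf := List.drop_left

theorem pvMain : ∀ (n : Nat) (l : List Int), l.length ≤ n →
    fncEliminaCerolst l = fncEliminaCerolst_alt l := by
  intro n
  induction n with
  | zero =>
      intro l hl
      have : l = [] := List.eq_nil_of_length_eq_zero (Nat.le_zero.mp hl)
      subst this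
      simp [fncEliminaCerolst, fncEliminaCerolst_alt]
  | succ n ih =>
      intro l hl
      by_cases h : (0 : Int) ∈ l
      · -- decompose at the first zero
        obtain ⟨pre, suf, hdec, hlen, hpre⟩ :=
          (PySem.List.index?_eq_some_iff l 0 (l.idxOf 0)).mp
            (by rw [PySem.List.index?_eq_idxOf?]; exact pvIdxOf?_of_mem l h)
        subst hdec
        have hslice := pvSlice_eq_suf pre suf hpre
        have hcount : PySem.List.count (pre ++ 0 :: suf) 0 = 1 + List.count 0 suf := by
          simp [PySem.List.count, List.count_append, List.count_eq_zero.mpr hpre]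
          omega
        have hfold : (pre ++ 0 :: suf).foldl pvStep (([] : List Int), false)
            = suf.foldl pvStep (([] : List Int), true) := by
          rw [List.foldl_append, pvFold_no_zero pre [] false hpre]
          simp [pvStep]
        by_cases hs : (0 : Int) ∈ suf
        · -- more than one zero: A recurses on suf; B's result equals B on suf
          have hA : fncEliminaCerolst (pre ++ 0 :: suf) = fncEliminaCerolst suf := by
            rw [fncEliminaCerolst]
            have hc : PySem.List.count (pre ++ 0 :: suf) 0 > 1 := by
              have := List.count_pos_iff.mpr hs
              omega
            simp only [dif_pos h, if_pos hc, hslice]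
          have hsuf : suf.length ≤ n := by
            have : (pre ++ 0 :: suf).length = pre.length + 1 + suf.length := by simp; omega
            omega
          have hBsuf : fncEliminaCerolst_alt suf
              = (suf.foldl pvStep (([] : List Int), true)).1 := by
            unfold fncEliminaCerolst_alt
            rw [pvFold_indep suf hs _ (([] : List Int), true)]
            simp [pvFold_flag suf hs]
          have hB : fncEliminaCerolst_alt (pre ++ 0 :: suf)
              = (suf.foldl pvStep (([] : List Int), true)).1 := by
            unfold fncEliminaCerolst_alt
            rw [hfold]
            simp [pvFold_flag suf hs]
          rw [hA, ih suf hsuf, hBsuf, hB]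
        · -- exactly one zero: both return suf
          have hA : fncEliminaCerolst (pre ++ 0 :: suf) = suf := by
            rw [fncEliminaCerolst]
            have hc : ¬ PySem.List.count (pre ++ 0 :: suf) 0 > 1 := by
              have : List.count 0 suf = 0 := List.count_eq_zero.mpr hs
              omega
            simp only [dif_pos h, if_neg hc, hslice]
          have hB : fncEliminaCerolst_alt (pre ++ 0 :: suf) = suf := by
            unfold fncEliminaCerolst_alt
            rw [hfold, pvFold_no_zero suf [] true hs]
            simp
          rw [hA, hB]
      · -- no zero: both return the list unchanged
        rw [fncEliminaCerolst]
        unfold fncEliminaCerolst_alt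
        rw [pvFold_no_zero l [] false h]
        simp [h]

-- ===== VERDICT (by name: the statement is the Claim_ definition above) =====
theorem fncEliminaCerolst_spec : Claim_equal_fncEliminaCerolst := by
  intro l _
  unfold Spec_fncEliminaCerolst
  exact pvMain l.length l le_rfl
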